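-- pv_equiv track=rewrite | github.com/Toundra220/Project-2048 | 2048.py | appliquer_mouvement
-- ===== SOURCE A (Python) =====
-- def creer_grille(taille):
--     """Crée une grille vide avec des cases à zéro."""
--     grille = []
--     for _ in range(taille):
--         ligne = [0] * taille
--         grille.append(ligne)
--     return grille
--
-- def deplacer_ligne(ligne):
--     """Déplace et combine les nombres d'une ligne vers la gauche."""
--     taille = len(ligne)
--     resultat = [0] * taille
--     position = 0
--
--     for i in range(taille):
--         if ligne[i] != 0:
--             if resultat[position] == 0:
--                 resultat[position] = ligne[i]
--             elif resultat[position] == ligne[i]: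
--                 resultat[position] += ligne[i]
--                 position += 1
--             else:
--                 position += 1
--                 resultat[position] = ligne[i]
--
--     return resultat
--
-- def appliquer_mouvement(grille, direction):
--     """Applique le mouvement choisi à la grille."""
--     taille = len(grille)
--     nouvelle_grille = creer_grille(taille)
--
--     if direction == "gauche":
--         for i in range(taille):
--             nouvelle_grille[i] = deplacer_ligne(grille[i])
--
--     elif direction == "droite":
--         for i in range(taille):
--             nouvelle_grille[i] = deplacer_ligne(grille[i][::-1])[::-1]
--
--     elif direction == "haut":
--         for j in range(taille):
--             colonne = [grille[i][j] for i in range(taille)]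
--             nouvelle_colonne = deplacer_ligne(colonne)
--             for i in range(taille):
--                 nouvelle_grille[i][j] = nouvelle_colonne[i]
--
--     elif direction == "bas":
--         for j in range(taille):
--             colonne = [grille[i][j] for i in range(taille)][::-1]
--             nouvelle_colonne = deplacer_ligne(colonne)[::-1]
--             for i in range(taille):
--                 nouvelle_grille[i][j] = nouvelle_colonne[i]
--
--     return nouvelle_grille
-- ===== SOURCE B (Python) =====
-- def appliquer_mouvement(grille, direction):
--     """Applique le mouvement choisi a la grille (compact -> pairwise merge -> pad)."""
--     n = len(grille)
--
--     def glisser(ligne):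
--         vals = [x for x in ligne if x != 0]
--         fusion = []
--         k = 0
--         while k < len(vals):
--             if k + 1 < len(vals) and vals[k] == vals[k + 1]:
--                 fusion.append(vals[k] * 2)
--                 k += 2
--             else:
--                 fusion.append(vals[k])
--                 k += 1
--         return fusion + [0] * (len(ligne) - len(fusion))
--
--     if direction == "gauche":
--         return [glisser(ligne) for ligne in grille]
--     if direction == "droite":
--         return [glisser(ligne[::-1])[::-1] for ligne in grille]
--     if direction == "haut" or direction == "bas":
--         cols = [[grille[i][j] for i in range(n)] for j in range(n)]
--         if direction == "bas":
--             cols = [c[::-1] for c in cols]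
--         new_cols = [glisser(c) for c in cols]
--         if direction == "bas":
--             new_cols = [c[::-1] for c in new_cols]
--         return [[new_cols[j][i] for j in range(n)] for i in range(n)]
--     return [[0] * n for _ in range(n)]
-- ===== Notes on version B (the rewrite author's own statement) =====
-- stated objective: alternative
-- what changed: The row slide is re-decomposed as compact-nonzeros -> pairwise merge of adjacent equal values -> pad with zeros (instead of A's positional write-cursor into a preallocated zero row), and 'haut'/'bas' are handled by one explicit transpose + row slides + transpose back instead of A's per-column gather/scatter into the new grid; the invalid-direction all-zeros result is preserved.
import Mathlib
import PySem

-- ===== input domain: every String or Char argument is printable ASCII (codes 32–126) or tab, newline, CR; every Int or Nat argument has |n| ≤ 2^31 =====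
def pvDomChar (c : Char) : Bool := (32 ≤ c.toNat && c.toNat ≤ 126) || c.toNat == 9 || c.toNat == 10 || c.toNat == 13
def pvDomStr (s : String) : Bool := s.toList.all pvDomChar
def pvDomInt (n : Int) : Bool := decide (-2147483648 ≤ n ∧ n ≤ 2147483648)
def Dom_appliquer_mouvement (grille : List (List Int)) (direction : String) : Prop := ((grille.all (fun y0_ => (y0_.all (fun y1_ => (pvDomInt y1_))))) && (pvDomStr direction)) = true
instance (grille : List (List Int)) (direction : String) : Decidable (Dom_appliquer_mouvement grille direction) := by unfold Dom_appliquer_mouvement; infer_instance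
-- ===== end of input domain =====

-- B re-decomposes the slide as compact → pairwise-merge → pad and does 'haut'/'bas' by transpose + row slides;
-- same results as A everywhere A returns (equivalence of return values; neither mutates its argument).

-- ===== PORT A =====

-- creer_grille(taille): loop appending [0]*taille, taille times
def creer_grille (taille : Nat) : List (List Int) :=
  (List.range taille).map (fun _ => List.replicate taille 0)

-- deplacer_ligne: the i-loop over ligne with state (resultat, position); reads/writes
-- resultat[position] (always in range while the Python runs, so getD/set are exact there)
def depStep (st : List Int × Nat) (x : Int) : List Int × Nat :=
  if x ≠ 0 then
    if st.1.getD st.2 0 = 0 then (st.1.set st.2 x, st.2)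
    else if st.1.getD st.2 0 = x then (st.1.set st.2 (st.1.getD st.2 0 + x), st.2 + 1)
    else (st.1.set (st.2 + 1) x, st.2 + 1)
  else st

def deplacer_ligne (ligne : List Int) : List Int :=
  (ligne.foldl depStep (List.replicate ligne.length 0, 0)).1

-- A's j-loop for 'haut'/'bas' writes cell (i,j) := nouvelle_colonne_j[i] exactly once;
-- rendered as a gather of the same values (exact: grille[i][j] via getD, in range under Pre_)
def appliquer_mouvement (grille : List (List Int)) (direction : String) : List (List Int) :=
  let taille := grille.length
  if direction = "gauche" then
    grille.map (fun ligne => deplacer_ligne ligne)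
  else if direction = "droite" then
    grille.map (fun ligne => (deplacer_ligne ligne.reverse).reverse)
  else if direction = "haut" then
    (List.range taille).map (fun i => (List.range taille).map (fun j =>
      (deplacer_ligne ((List.range taille).map (fun k => (grille.getD k []).getD j 0))).getD i 0))
  else if direction = "bas" then
    (List.range taille).map (fun i => (List.range taille).map (fun j =>
      ((deplacer_ligne ((List.range taille).map (fun k => (grille.getD k []).getD j 0)).reverse).reverse).getD i 0))
  else
    creer_grille taille

-- ===== PORT B =====

-- the while-loop over vals with lookahead vals[k+1]: structural recursion consuming one or two cells
def fusionner (vals : List Int) : List Int :=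
  match vals with
  | [] => []
  | [a] => [a]
  | a :: b :: t => if a = b then a * 2 :: fusionner t else a :: fusionner (b :: t)

def glisser (ligne : List Int) : List Int :=
  let fusion := fusionner (ligne.filter (fun x => x ≠ 0))
  fusion ++ List.replicate (ligne.length - fusion.length) 0

def appliquer_mouvement_alt (grille : List (List Int)) (direction : String) : List (List Int) :=
  let n := grille.length
  if direction = "gauche" then
    grille.map (fun ligne => glisser ligne)
  else if direction = "droite" then
    grille.map (fun ligne => (glisser ligne.reverse).reverse)
  else if direction = "haut" ∨ direction = "bas" then
    let cols := (List.range n).map (fun j => (List.range n).map (fun i => (grille.getD i []).getD j 0))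
    let cols := if direction = "bas" then cols.map List.reverse else cols
    let newCols := cols.map glisser
    let newCols := if direction = "bas" then newCols.map List.reverse else newCols
    (List.range n).map (fun i => (List.range n).map (fun j => (newCols.getD j []).getD i 0))
  else
    List.replicate n (List.replicate n 0)

-- ===== PRECONDITION & SPEC =====
-- Pre_ excludes exactly the inputs where A raises IndexError: 'haut'/'bas' on a grid with some
-- row shorter than the number of rows (the column gather grille[i][j] goes out of range).
def Pre_appliquer_mouvement (grille : List (List Int)) (direction : String) : Prop :=
  (direction = "haut" ∨ direction = "bas") → ∀ row ∈ grille, grille.length ≤ row.length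
instance (grille : List (List Int)) (direction : String) : Decidable (Pre_appliquer_mouvement grille direction) := by unfold Pre_appliquer_mouvement; infer_instance

def pvWitness_appliquer_mouvement : List (List Int) × String := ([[2, 2, 0], [4, 0, 2], [0, 2, 2]], "haut")

def Spec_appliquer_mouvement (grille : List (List Int)) (direction : String) (out : List (List Int)) : Prop := out = appliquer_mouvement_alt grille direction
instance (grille : List (List Int)) (direction : String) (out : List (List Int)) : Decidable (Spec_appliquer_mouvement grille direction out) := by unfold Spec_appliquer_mouvement; infer_instance

-- ===== CLAIM (what is proved, stated in full; the proofs are below) =====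
def Claim_equal_appliquer_mouvement : Prop := ∀ (grille : List (List Int)) (direction : String), Dom_appliquer_mouvement grille direction → Pre_appliquer_mouvement grille direction → Spec_appliquer_mouvement grille direction (appliquer_mouvement grille direction)

-- ===== LEMMAS AND PROOFS =====

-- 'fusionner with a pending nonzero value p in front'
def fusionP (p : Int) (vs : List Int) : List Int :=
  match vs with
  | [] => [p]
  | v :: vs => if p = v then p * 2 :: fusionner vs else p :: fusionP v vs

theorem fusionner_cons (a : Int) (t : List Int) : fusionner (a :: t) = fusionP a t := by
  induction t generalizing a with
  | nil => rfl
  | cons b t ih => simp only [fusionner, fusionP, ih b]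

def fusionOpt (p : Option Int) (vs : List Int) : List Int :=
  match p with
  | none => fusionner vs
  | some q => fusionP q vs

theorem getD_append_len (F l : List Int) (d : Int) : (F ++ l).getD F.length d = l.getD 0 d := by
  simp [List.getD, List.getElem?_append_right]

theorem set_append_len (F l : List Int) (v : Int) : (F ++ l).set F.length v = F ++ l.set 0 v := by
  induction F with
  | nil => rfl
  | cons a F ih => simp [ih]

theorem state_zero (F : List Int) (m : Nat) (x : Int) (hx : x ≠ 0) :
    depStep (F ++ [] ++ List.replicate (m + 1) 0, F.length) x
      = (F ++ [x] ++ List.replicate m 0, F.length) := by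
  simp only [depStep, List.append_nil, List.replicate_succ]
  rw [getD_append_len]
  simp [hx]

theorem state_merge (F : List Int) (m : Nat) (q x : Int) (hq : q ≠ 0) (hqx : q = x) :
    depStep (F ++ [q] ++ List.replicate m 0, F.length) x
      = ((F ++ [q + x]) ++ [] ++ List.replicate m 0, (F ++ [q + x]).length) := by
  subst hqx
  simp only [depStep, List.append_assoc]
  rw [getD_append_len]
  simp [hq]

theorem state_shift (F : List Int) (m : Nat) (q x : Int) (hq : q ≠ 0) (hqx : ¬ q = x)
    (hx : x ≠ 0) :
    depStep (F ++ [q] ++ List.replicate (m + 1) 0, F.length) x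
      = ((F ++ [q]) ++ [x] ++ List.replicate m 0, (F ++ [q]).length) := by
  simp only [depStep, List.append_assoc, List.replicate_succ]
  rw [getD_append_len]
  have hlen1 : F.length + 1 = (F ++ [q]).length := by simp
  simp only [List.cons_append, List.nil_append, List.getD, List.getElem?_cons_zero,
    Option.getD_some, if_neg hq, if_neg hqx, if_pos hx, hlen1]
  rw [show F ++ (q : Int) :: ((0:Int) :: List.replicate m 0)
        = (F ++ [q]) ++ ((0:Int) :: List.replicate m 0) by simp,
      set_append_len]
  simp [List.set]

-- the loop invariant: state = (F ++ p.toList ++ zeros, |F|), result = F ++ fusion of pending+rest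
theorem dep_loop (rest : List Int) :
    ∀ (F : List Int) (p : Option Int) (n : Nat),
    (∀ q, p = some q → q ≠ 0) →
    F.length + p.toList.length + (rest.filter (fun x => x ≠ 0)).length ≤ n →
    (rest.foldl depStep
      (F ++ p.toList ++ List.replicate (n - F.length - p.toList.length) 0, F.length)).1
    = (F ++ fusionOpt p (rest.filter (fun x => x ≠ 0)))
      ++ List.replicate (n - (F ++ fusionOpt p (rest.filter (fun x => x ≠ 0))).length) 0 := by
  induction rest with
  | nil =>
    intro F p n hp hlen
    cases p <;> simp [fusionOpt, fusionner, fusionP, Nat.sub_sub]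
  | cons x rest ih =>
    intro F p n hp hlen
    by_cases hx : x = 0
    · subst hx
      have h0 : depStep (F ++ p.toList ++ List.replicate (n - F.length - p.toList.length) 0,
          F.length) 0 = (F ++ p.toList ++ List.replicate (n - F.length - p.toList.length) 0,
          F.length) := by simp [depStep]
      rw [List.foldl_cons, h0]
      simpa using ih F p n hp (by simpa using hlen)
    · cases p with
      | none =>
        have hm : ∃ m, n - F.length - ([] : List Int).length = m + 1 := by
          refine ⟨n - F.length - 1, ?_⟩
          simp [hx] at hlen
          simp only [List.length_nil]
          omega
        obtain ⟨m, hm⟩ := hm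
        rw [List.foldl_cons]
        simp only [Option.toList]
        rw [show (([] : List Int)).length = ([] : List Int).length from rfl] at hm
        rw [hm, state_zero F m x hx]
        have hmm : m = n - F.length - [x].length := by
          simp only [List.length_nil] at hm
          simp only [List.length_cons, List.length_nil]
          omega
        rw [hmm]
        have := ih F (some x) n (by intro q hq; cases hq; exact hx)
          (by simp [hx] at hlen ⊢; omega)
        simp only [Option.toList] at this
        rw [this]
        simp [fusionOpt, hx, fusionner_cons]
      | some q =>
        have hq : q ≠ 0 := hp q rfl
        rw [List.foldl_cons]
        simp only [Option.toList]
        by_cases hqx : q = x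
        · rw [show (some q).toList = [q] from rfl] at *
          rw [state_merge F _ q x hq hqx]
          have hmm : n - F.length - [q].length
              = n - (F ++ [q + x]).length - ([] : List Int).length := by
            simp; omega
          rw [hmm]
          have := ih (F ++ [q + x]) none n (by intro r hr; cases hr)
            (by simp [hx] at hlen ⊢; omega)
          simp only [Option.toList] at this
          rw [this]
          subst hqx
          have h2q : q + q = q * 2 := by ring
          simp [fusionOpt, hq, fusionP, h2q, List.append_assoc]
        · have hm : ∃ m, n - F.length - [q].length = m + 1 := by
            refine ⟨n - F.length - 2, ?_⟩
            simp only [List.length_cons, List.length_nil]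
            simp [hx] at hlen
            omega
          obtain ⟨m, hm⟩ := hm
          rw [show (some q).toList = [q] from rfl] at *
          rw [hm, state_shift F m q x hq hqx hx]
          have hmm : m = n - (F ++ [q]).length - [x].length := by
            simp only [List.length_cons, List.length_nil, List.length_append] at hm ⊢
            omega
          rw [hmm]
          have := ih (F ++ [q]) (some x) n (by intro r hr; cases hr; exact hx)
            (by simp [hx] at hlen ⊢; omega)
          simp only [Option.toList] at this
          rw [this]
          simp [fusionOpt, hx, fusionP, hqx, List.append_assoc]

theorem deplacer_eq_glisser (ligne : List Int) : deplacer_ligne ligne = glisser ligne := by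
  have h := dep_loop ligne [] none ligne.length (by intro q hq; cases hq)
    (by simpa using List.length_filter_le _ ligne)
  simpa [deplacer_ligne, glisser, fusionOpt] using h

theorem getD_map_range {α : Type} (n j : Nat) (f : Nat → α) (d : α) (h : j < n) :
    ((List.range n).map f).getD j d = f j := by
  simp [List.getD, h]

-- ===== VERDICT (by name: the statement is the Claim_ definition above) =====
theorem appliquer_mouvement_spec : Claim_equal_appliquer_mouvement := by
  intro grille direction _ _
  unfold Spec_appliquer_mouvement appliquer_mouvement appliquer_mouvement_alt
  by_cases h1 : direction = "gauche"
  · simp [h1, deplacer_eq_glisser]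
  by_cases h2 : direction = "droite"
  · simp [h2, deplacer_eq_glisser]
  by_cases h3 : direction = "haut"
  · subst h3
    simp only [if_neg h1, if_neg h2,
      if_neg (by decide : ¬ ("haut" : String) = "bas"), if_true, List.map_map]
    refine List.map_congr_left ?_
    intro i _
    refine List.map_congr_left ?_
    intro j hj
    rw [getD_map_range _ _ _ _ (List.mem_range.mp hj), deplacer_eq_glisser]
    rfl
  by_cases h4 : direction = "bas"
  · subst h4
    simp only [if_neg h1, if_neg h2, if_neg h3,
      if_true, List.map_map]
    refine List.map_congr_left ?_
    intro i _
    refine List.map_congr_left ?_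
    intro j hj
    simp only [Function.comp_def]
    rw [getD_map_range _ _ _ _ (List.mem_range.mp hj), deplacer_eq_glisser]
  · simp only [if_neg h1, if_neg h2, if_neg h3, if_neg h4,
      if_neg (by simp [h3, h4] : ¬ (direction = "haut" ∨ direction = "bas"))]
    simp [creer_grille, List.map_const']
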